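-- pv_equiv track=rewrite | github.com/Luecx/SudokuSolver | finnssudokusite/sudoku/scripts/tabular_view.py | merge_status
-- ===== SOURCE A (Python) =====
-- from collections import defaultdict
--
-- def merge_status(done, ongoing):
--     status = defaultdict(str)
--     for key, val in done.items():
--         status[key] += val
--     for key, val in ongoing.items():
--         if 'D' in status[key]:
--             status[key] = 'DO'
--         else:
--             status[key] += val
--     return status
-- ===== SOURCE B (Python) =====
-- from collections import defaultdict
--
-- def merge_status(done, ongoing):
--     # One pass over done deciding each key's final value, then the ongoing-only keys.
--     status = defaultdict(str)
--     for key, dval in done.items():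
--         if key in ongoing:
--             status[key] = 'DO' if 'D' in dval else '' + dval + ongoing[key]
--         else:
--             status[key] = '' + dval
--     for key, oval in ongoing.items():
--         if key not in done:
--             status[key] = '' + oval
--     return status
-- ===== Notes on version B (the rewrite author's own statement) =====
-- stated objective: alternative
-- what changed: A runs two dependent sequential passes that grow and then rewrite a defaultdict (the second pass reads and mutates the accumulated state per key); B decides each key's final value in one shot from the two input dicts: one pass over done computing the merged value directly, then one pass appending the ongoing-only keys, so the result dict is written once and never re-read.
import Mathlib
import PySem

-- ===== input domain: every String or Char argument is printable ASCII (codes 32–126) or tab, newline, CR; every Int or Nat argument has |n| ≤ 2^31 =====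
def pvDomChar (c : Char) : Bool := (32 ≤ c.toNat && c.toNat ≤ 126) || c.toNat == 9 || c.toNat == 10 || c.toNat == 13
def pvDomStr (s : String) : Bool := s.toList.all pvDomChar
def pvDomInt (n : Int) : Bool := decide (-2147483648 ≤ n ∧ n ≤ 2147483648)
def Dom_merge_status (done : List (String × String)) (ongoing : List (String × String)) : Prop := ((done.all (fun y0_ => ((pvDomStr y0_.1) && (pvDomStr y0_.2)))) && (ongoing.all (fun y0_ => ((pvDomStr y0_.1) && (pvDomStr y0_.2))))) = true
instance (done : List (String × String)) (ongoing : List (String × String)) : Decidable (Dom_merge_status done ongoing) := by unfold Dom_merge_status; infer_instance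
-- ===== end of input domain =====

-- B replaces A's two dependent sequential passes over a growing defaultdict with one pass
-- over done that decides each key's final value directly, plus a pass adding ongoing-only keys (objective: alternative).

-- ===== PORT A =====
def merge_status (done : List (String × String)) (ongoing : List (String × String)) : List (String × String) :=
  let status : PySem.Dict String String := PySem.Dict.empty
  let status := done.foldl (fun d kv => d.insert kv.1 (d.getD kv.1 "" ++ kv.2)) status
  let status := ongoing.foldl (fun d kv =>
      if PySem.Str.isIn "D" (d.getD kv.1 "") then d.insert kv.1 "DO"
      else d.insert kv.1 (d.getD kv.1 "" ++ kv.2)) status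
  status.items

-- ===== PORT B =====
def merge_status_alt (done : List (String × String)) (ongoing : List (String × String)) : List (String × String) :=
  let od := PySem.Dict.mk ongoing
  let dd := PySem.Dict.mk done
  let s1 := done.foldl (fun d kv =>
      d.insert kv.1 (match od.get? kv.1 with
        | some ov => if PySem.Str.isIn "D" kv.2 then "DO" else ("" ++ kv.2) ++ ov
        | none => "" ++ kv.2)) PySem.Dict.empty
  let s2 := ongoing.foldl (fun d kv =>
      if dd.contains kv.1 then d else d.insert kv.1 ("" ++ kv.2)) s1
  s2.items

-- ===== PRECONDITION & SPEC =====
-- Pre_ excludes association lists with duplicate keys: they cannot arise from Python dict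
-- arguments (a dict has unique keys), so nothing A returns on is excluded.
def Pre_merge_status (done : List (String × String)) (ongoing : List (String × String)) : Prop :=
  (done.map Prod.fst).Nodup ∧ (ongoing.map Prod.fst).Nodup
instance (done : List (String × String)) (ongoing : List (String × String)) : Decidable (Pre_merge_status done ongoing) := by unfold Pre_merge_status; infer_instance
def pvWitness_merge_status : (List (String × String)) × (List (String × String)) :=
  ([("a", "D"), ("b", "x")], [("a", "y"), ("c", "z")])

def Spec_merge_status (done : List (String × String)) (ongoing : List (String × String)) (out : List (String × String)) : Prop := out = merge_status_alt done ongoing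
instance (done : List (String × String)) (ongoing : List (String × String)) (out : List (String × String)) : Decidable (Spec_merge_status done ongoing out) := by unfold Spec_merge_status; infer_instance

-- ===== CLAIM (what is proved, stated in full; the proofs are below) =====
def Claim_equal_merge_status : Prop := ∀ (done : List (String × String)) (ongoing : List (String × String)), Dom_merge_status done ongoing → Pre_merge_status done ongoing → Spec_merge_status done ongoing (merge_status done ongoing)

-- ===== LEMMAS AND PROOFS =====

-- first-match lookup in the ongoing dict applied to one finished entry (A's second pass, per key)
def pvUpd (l : List (String × String)) (p : String × String) : String × String :=
  match (PySem.Dict.mk l).get? p.1 with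
  | some ov => (p.1, if PySem.Str.isIn "D" p.2 then "DO" else p.2 ++ ov)
  | none => p

lemma pvMkGet_none (l : List (String × String)) (k : String) (h : k ∉ l.map Prod.fst) :
    (PySem.Dict.mk l).get? k = none := by
  rw [PySem.Dict.get?_eq_none_iff_not_mem_keys]
  simpa [PySem.Dict.keys_mk] using h

lemma pvUpd_of_not_mem (l : List (String × String)) (p : String × String)
    (h : p.1 ∉ l.map Prod.fst) : pvUpd l p = p := by
  simp [pvUpd, pvMkGet_none l p.1 h]

-- A's first pass: all keys fresh and distinct, so it appends the entries in order
lemma pvPhaseA1 (l : List (String × String)) (d : PySem.Dict String String)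
    (hf : ∀ p ∈ l, d.contains p.1 = false) (hn : (l.map Prod.fst).Nodup) :
    (l.foldl (fun d kv => d.insert kv.1 (d.getD kv.1 "" ++ kv.2)) d).items
      = d.items ++ l.map (fun kv => (kv.1, "" ++ kv.2)) := by
  induction l generalizing d with
  | nil => simp
  | cons p t ih =>
    have hc : d.contains p.1 = false := hf p (by simp)
    have hn' : (t.map Prod.fst).Nodup := (List.nodup_cons.mp (by simpa using hn)).2
    have hpk : p.1 ∉ t.map Prod.fst := (List.nodup_cons.mp (by simpa using hn)).1
    have hf' : ∀ q ∈ t, (d.insert p.1 (d.getD p.1 "" ++ p.2)).contains q.1 = false := by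
      intro q hq
      rw [PySem.Dict.contains_insert]
      have hne : q.1 ≠ p.1 := by
        intro e; exact hpk (e ▸ List.mem_map_of_mem hq)
      simp [hne, hf q (List.mem_cons_of_mem _ hq)]
    simp only [List.foldl_cons]
    rw [ih _ hf' hn', PySem.Dict.getD_of_not_contains _ _ hc,
        PySem.Dict.items_insert_of_not_contains _ _ hc]
    simp

-- A's second pass: rewrites the existing entries in place, appends the fresh ones
lemma pvPhaseA2 (l : List (String × String)) (d : PySem.Dict String String)
    (hdn : d.keys.Nodup) (hn : (l.map Prod.fst).Nodup) :
    (l.foldl (fun d kv =>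
        if PySem.Str.isIn "D" (d.getD kv.1 "") then d.insert kv.1 "DO"
        else d.insert kv.1 (d.getD kv.1 "" ++ kv.2)) d).items
      = d.items.map (pvUpd l)
        ++ (l.filter (fun kv => !(d.contains kv.1))).map (fun kv => (kv.1, "" ++ kv.2)) := by
  induction l generalizing d with
  | nil =>
    simp only [List.foldl_nil, List.filter_nil, List.map_nil, List.append_nil]
    have h0 : ∀ p ∈ d.items, pvUpd [] p = p := by
      intro p _; exact pvUpd_of_not_mem [] p (by simp)
    rw [List.map_congr_left h0, List.map_id']
  | cons q t ih =>
    obtain ⟨qk, qv⟩ := q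
    have hn' : (t.map Prod.fst).Nodup := (List.nodup_cons.mp (by simpa using hn)).2
    have hqk : qk ∉ t.map Prod.fst := (List.nodup_cons.mp (by simpa using hn)).1
    simp only [List.foldl_cons]
    by_cases hc : d.contains qk = true
    · -- qk already a key of d: the step overwrites it in place
      set nv : String := if PySem.Str.isIn "D" (d.getD qk "") then "DO" else d.getD qk "" ++ qv with hnv
      have hstep : (if PySem.Str.isIn "D" (d.getD qk "") then d.insert qk "DO"
          else d.insert qk (d.getD qk "" ++ qv)) = d.insert qk nv := by
        rw [hnv]; split_ifs <;> rfl
      rw [hstep, ih _ (PySem.Dict.nodup_keys_insert _ _ _ hdn) hn']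
      rw [PySem.Dict.items_insert_of_contains d nv hc, List.map_map]
      congr 1
      · -- rewritten entries
        apply List.map_congr_left
        intro p hp
        by_cases he : p.1 = qk
        · have hval : d.getD qk "" = p.2 := by
            have hm : (qk, p.2) ∈ d.items := by
              have hp' := hp; rw [show p = (p.1, p.2) from rfl, he] at hp'; exact hp'
            exact PySem.Dict.getD_of_mem_items d hm hdn ""
          have hb : (p.1 == qk) = true := by simpa using he
          simp only [Function.comp_apply, hb, if_pos]
          rw [pvUpd_of_not_mem t (qk, nv) (by simpa using hqk)]
          simp only [pvUpd, he, PySem.Dict.get?_mk_cons, beq_self_eq_true, if_pos]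
          rw [hnv, hval]
        · have hbeq : (p.1 == qk) = false := by simpa using he
          simp only [Function.comp_apply, hbeq, Bool.false_eq_true, if_false]
          simp only [pvUpd, PySem.Dict.get?_mk_cons,
            show (qk == p.1) = false by simpa using (Ne.symm he)]
          simp
      · -- filter part
        rw [List.filter_cons, if_neg (by simp [hc])]
        apply congrArg
        apply List.filter_congr
        intro kv hkv
        have hne : kv.1 ≠ qk := by
          intro e; exact hqk (e ▸ List.mem_map_of_mem hkv)
        rw [PySem.Dict.contains_insert]
        simp [hne]
    · -- qk fresh: the step appends (qk, "" ++ qv)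
      have hc' : d.contains qk = false := by simpa using hc
      have hgd : d.getD qk "" = "" := PySem.Dict.getD_of_not_contains d "" hc'
      have hiD : PySem.Str.isIn "D" "" = false := by decide
      rw [hgd, hiD]
      simp only [Bool.false_eq_true, if_false]
      rw [ih _ (PySem.Dict.nodup_keys_insert _ _ _ hdn) hn',
          PySem.Dict.items_insert_of_not_contains _ _ hc']
      rw [List.map_append]
      have hupd1 : ∀ p ∈ d.items, pvUpd t p = pvUpd ((qk, qv) :: t) p := by
        intro p hp
        have hpkeys : p.1 ∈ d.keys := PySem.Dict.mem_keys_of_mem_items d hp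
        have hcp : d.contains p.1 = true := by
          rw [PySem.Dict.contains_eq_decide_mem_keys]; simpa using hpkeys
        have hne : qk ≠ p.1 := by
          intro e; rw [← e, hc'] at hcp; exact Bool.noConfusion hcp
        simp only [pvUpd, PySem.Dict.get?_mk_cons, show (qk == p.1) = false by simpa using hne]
        simp
      rw [List.map_congr_left (fun p hp => (hupd1 p hp).symm)]
      rw [List.map_singleton, pvUpd_of_not_mem t (qk, "" ++ qv) (by simpa using hqk)]
      rw [List.filter_cons, if_pos (by simp [hc'])]
      have hfilt : t.filter (fun kv => !((d.insert qk ("" ++ qv)).contains kv.1))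
          = t.filter (fun kv => !(d.contains kv.1)) := by
        apply List.filter_congr
        intro kv hkv
        have hne : kv.1 ≠ qk := by
          intro e; exact hqk (e ▸ List.mem_map_of_mem hkv)
        rw [PySem.Dict.contains_insert]
        simp [hne]
      rw [hfilt]
      simp

-- B's second pass: conditional insert of fresh distinct keys appends
lemma pvPhaseB2 (l : List (String × String)) (d dd : PySem.Dict String String)
    (hn : (l.map Prod.fst).Nodup)
    (hfr : ∀ kv ∈ l, dd.contains kv.1 = false → d.contains kv.1 = false) :
    (l.foldl (fun d kv => if dd.contains kv.1 then d else d.insert kv.1 ("" ++ kv.2)) d).items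
      = d.items ++ (l.filter (fun kv => !(dd.contains kv.1))).map (fun kv => (kv.1, "" ++ kv.2)) := by
  induction l generalizing d with
  | nil => simp
  | cons q t ih =>
    obtain ⟨qk, qv⟩ := q
    have hn' : (t.map Prod.fst).Nodup := (List.nodup_cons.mp (by simpa using hn)).2
    have hqk : qk ∉ t.map Prod.fst := (List.nodup_cons.mp (by simpa using hn)).1
    simp only [List.foldl_cons]
    by_cases hdd : dd.contains qk = true
    · rw [if_pos hdd, ih _ hn' (fun kv hkv h => hfr kv (List.mem_cons_of_mem _ hkv) h)]
      rw [List.filter_cons, if_neg (by simp [hdd])]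
    · have hdd' : dd.contains qk = false := by simpa using hdd
      rw [if_neg hdd]
      have hfresh : d.contains qk = false := hfr (qk, qv) (by simp) hdd'
      have hfr' : ∀ kv ∈ t, dd.contains kv.1 = false → (d.insert qk ("" ++ qv)).contains kv.1 = false := by
        intro kv hkv h
        have hne : kv.1 ≠ qk := by
          intro e; exact hqk (e ▸ List.mem_map_of_mem hkv)
        rw [PySem.Dict.contains_insert]
        simp [hne, hfr kv (List.mem_cons_of_mem _ hkv) h]
      rw [ih _ hn' hfr', PySem.Dict.items_insert_of_not_contains _ _ hfresh]
      rw [List.filter_cons, if_pos (by simp [hdd'])]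
      simp

-- ===== VERDICT (by name: the statement is the Claim_ definition above) =====
theorem merge_status_spec : Claim_equal_merge_status := by
  intro done ongoing _ hpre
  obtain ⟨hd, ho⟩ := hpre
  unfold Spec_merge_status
  simp only [merge_status, merge_status_alt]
  -- A, first pass
  have hA1 : (done.foldl (fun d kv => d.insert kv.1 (d.getD kv.1 "" ++ kv.2)) PySem.Dict.empty).items
      = done.map (fun kv => (kv.1, "" ++ kv.2)) := by
    simpa using pvPhaseA1 done PySem.Dict.empty (fun p _ => PySem.Dict.contains_empty p.1) hd
  have hAk : (done.foldl (fun d kv => d.insert kv.1 (d.getD kv.1 "" ++ kv.2)) PySem.Dict.empty).keys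
      = done.map Prod.fst := by
    simp only [PySem.Dict.keys, hA1, List.map_map]
    rfl
  -- A, second pass
  have hA2 := pvPhaseA2 ongoing
    (done.foldl (fun d kv => d.insert kv.1 (d.getD kv.1 "" ++ kv.2)) PySem.Dict.empty)
    (by rw [hAk]; exact hd) ho
  -- B, first pass
  have hB1 : (done.foldl (fun d kv =>
        d.insert kv.1 (match (PySem.Dict.mk ongoing).get? kv.1 with
          | some ov => if PySem.Str.isIn "D" kv.2 then "DO" else ("" ++ kv.2) ++ ov
          | none => "" ++ kv.2)) PySem.Dict.empty).items
      = done.map (fun kv => (kv.1, match (PySem.Dict.mk ongoing).get? kv.1 with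
          | some ov => if PySem.Str.isIn "D" kv.2 then "DO" else ("" ++ kv.2) ++ ov
          | none => "" ++ kv.2)) := by
    simpa using PySem.Dict.items_foldl_insert_fresh done Prod.fst
      (fun kv => match (PySem.Dict.mk ongoing).get? kv.1 with
        | some ov => if PySem.Str.isIn "D" kv.2 then "DO" else ("" ++ kv.2) ++ ov
        | none => "" ++ kv.2)
      PySem.Dict.empty (fun a _ => PySem.Dict.contains_empty a.1) hd
  have hBk : (done.foldl (fun d kv =>
        d.insert kv.1 (match (PySem.Dict.mk ongoing).get? kv.1 with
          | some ov => if PySem.Str.isIn "D" kv.2 then "DO" else ("" ++ kv.2) ++ ov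
          | none => "" ++ kv.2)) PySem.Dict.empty).keys
      = done.map Prod.fst := by
    simp only [PySem.Dict.keys, hB1, List.map_map]
    rfl
  -- B, second pass
  have hB2 := pvPhaseB2 ongoing
    (done.foldl (fun d kv =>
        d.insert kv.1 (match (PySem.Dict.mk ongoing).get? kv.1 with
          | some ov => if PySem.Str.isIn "D" kv.2 then "DO" else ("" ++ kv.2) ++ ov
          | none => "" ++ kv.2)) PySem.Dict.empty)
    (PySem.Dict.mk done) ho
    (by
      intro kv _ h
      rw [PySem.Dict.contains_eq_decide_mem_keys, hBk]
      rw [PySem.Dict.contains_eq_decide_mem_keys, PySem.Dict.keys_mk] at h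
      exact h)
  rw [hA2, hB2, hA1, hB1, List.map_map]
  congr 1
  · -- the done-keyed entries agree pointwise
    apply List.map_congr_left
    intro kv _
    cases hg : (PySem.Dict.mk ongoing).get? kv.1 <;>
      simp [pvUpd, Function.comp, hg, String.empty_append]
  · -- the ongoing-only entries agree: the two containment tests are the same
    apply congrArg
    apply List.filter_congr
    intro kv _
    have hcc : (done.foldl (fun d kv => d.insert kv.1 (d.getD kv.1 "" ++ kv.2)) PySem.Dict.empty).contains kv.1
        = (PySem.Dict.mk done).contains kv.1 := by
      rw [PySem.Dict.contains_eq_decide_mem_keys, PySem.Dict.contains_eq_decide_mem_keys,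
          hAk, PySem.Dict.keys_mk]
    rw [hcc]
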